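-- pv_equiv track=rewrite | github.com/KostiantynPolishko1/HW09_Py_20230626_00 | main.py | fill_arr
-- ===== SOURCE A (Python) =====
-- def fill_arr(arr):
--     for i in range(sizeA):
--         temp = []
--         if i == 0 or i == sizeA - 1:
--             for j in range(sizeA):
--                 temp.append("*")
--         else:
--             for j in range(sizeA):
--                 if j == 0 or j == sizeA - 1:
--                     temp.append("*")
--                 else:
--                     temp.append(" ")
--         arr.append(temp)
--
--     return arr
--
-- sizeA: int = 10  # size of field game
-- ===== SOURCE B (Python) =====
-- sizeA: int = 10  # size of field game
--
-- def fill_arr(arr):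
--     # Allocate the full grid as interior, then paint the border in separate passes.
--     grid = [[" "] * sizeA for _ in range(sizeA)]
--     grid[0] = ["*"] * sizeA
--     grid[-1] = ["*"] * sizeA
--     for row in grid:
--         row[0] = "*"
--         row[-1] = "*"
--     arr.extend(grid)
--     return arr
-- ===== Notes on version B (the rewrite author's own statement) =====
-- stated objective: alternative
-- what changed: B allocates the whole 10x10 grid as blanks first and then paints the border in separate overwrite passes (whole first/last rows, then first/last cell of every row), instead of A's single pass deciding each cell with nested if/else.
import Mathlib
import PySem

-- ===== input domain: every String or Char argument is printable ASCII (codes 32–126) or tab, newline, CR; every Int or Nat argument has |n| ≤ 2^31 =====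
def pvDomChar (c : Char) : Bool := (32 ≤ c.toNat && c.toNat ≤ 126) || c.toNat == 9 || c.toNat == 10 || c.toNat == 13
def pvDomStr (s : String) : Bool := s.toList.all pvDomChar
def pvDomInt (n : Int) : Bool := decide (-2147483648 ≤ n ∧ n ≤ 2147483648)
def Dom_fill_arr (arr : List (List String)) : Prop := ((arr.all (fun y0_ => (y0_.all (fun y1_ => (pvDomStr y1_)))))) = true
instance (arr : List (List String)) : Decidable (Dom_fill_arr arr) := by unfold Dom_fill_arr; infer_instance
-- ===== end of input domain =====

-- B builds the grid blank-first and paints the border in overwrite passes, instead of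
-- deciding each cell in one nested pass (alternative decomposition, same cost).
-- Both versions mutate the argument in place (append rows); equivalence here is about the return value.


def sizeA : Int := 10

-- ===== PORT A =====
-- literal port: for i in range(sizeA): build temp cell by cell, append to arr
def fill_arr (arr : List (List String)) : List (List String) :=
  (PySem.List.pyRange 0 sizeA 1).foldl (fun acc i =>
    let temp : List String :=
      if i = 0 ∨ i = sizeA - 1 then
        (PySem.List.pyRange 0 sizeA 1).foldl (fun t _ => t ++ ["*"]) []
      else
        (PySem.List.pyRange 0 sizeA 1).foldl (fun t j =>
          if j = 0 ∨ j = sizeA - 1 then t ++ ["*"] else t ++ [" "]) []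
    acc ++ [temp]) arr

-- ===== PORT B =====
-- literal port of B: blank grid, overwrite first/last rows, then first/last cell of each row, extend
def fill_arr_alt (arr : List (List String)) : List (List String) :=
  let grid0 : List (List String) :=
    List.replicate sizeA.toNat (List.replicate sizeA.toNat " ")
  let stars : List String := List.replicate sizeA.toNat "*"
  let grid1 := (grid0.set 0 stars).set (sizeA.toNat - 1) stars
  let grid2 := grid1.map (fun row => (row.set 0 "*").set (sizeA.toNat - 1) "*")
  arr ++ grid2

-- ===== PRECONDITION & SPEC =====
def Spec_fill_arr (arr : List (List String)) (out : List (List String)) : Prop := out = fill_arr_alt arr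
instance (arr : List (List String)) (out : List (List String)) : Decidable (Spec_fill_arr arr out) := by unfold Spec_fill_arr; infer_instance

-- ===== CLAIM (what is proved, stated in full; the proofs are below) =====
def Claim_equal_fill_arr : Prop := ∀ (arr : List (List String)), Dom_fill_arr arr → Spec_fill_arr arr (fill_arr arr)

-- ===== LEMMAS AND PROOFS =====
-- Both programs return arr ++ C for the same constant 10×10 block C; factor arr out, then
-- compare the two closed constant blocks by decide.
theorem fill_arr_eq_append (arr : List (List String)) : fill_arr arr = arr ++ fill_arr [] := by
  unfold fill_arr
  simp only [PySem.List.foldl_append_singleton_eq_map, List.nil_append]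

theorem blocks_eq : fill_arr [] = fill_arr_alt [] := by decide

-- ===== VERDICT (by name: the statement is the Claim_ definition above) =====
theorem fill_arr_spec : Claim_equal_fill_arr := by
  intro arr _
  show fill_arr arr = fill_arr_alt arr
  rw [fill_arr_eq_append, blocks_eq]
  simp [fill_arr_alt]
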